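-- pv_equiv track=rewrite | github.com/jayhyun-hwang/jhLeetCode | python-code/exam/nfTest/dict()_set().py | solution
-- ===== SOURCE A (Python) =====
-- import collections
-- from typing import List
--
-- def solution(id_list: List[str], k: int) -> int:
--
--     answer = 0
--
--     dict1 = collections.defaultdict(int)
--     # 문자열 split, set에 넣기
--     for day_id_list in id_list:
--         tempset = set(day_id_list.split(" "))
--         for val in tempset:
--             if dict1[val] < k:
--                 dict1[val] += 1
--
--     answer = sum(dict1.values())
--     return answer
-- ===== SOURCE B (Python) =====
-- def solution(id_list, k):
--     # Sort-then-scan: gather distinct per-day tokens, sort, sum capped run lengths.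
--     tokens = []
--     for day in id_list:
--         tokens.extend(set(day.split(" ")))
--     tokens.sort()
--     cap = max(k, 0)
--     total = 0
--     run = 0
--     prev = None
--     for t in tokens:
--         if t == prev:
--             run += 1
--         else:
--             total += min(run, cap)
--             run = 1
--             prev = t
--     return total + min(run, cap)
-- ===== Notes on version B (the rewrite author's own statement) =====
-- stated objective: alternative
-- what changed: B drops A's dict and its per-increment 'if current < k' branch entirely: it collects all distinct per-day tokens into one list, sorts it, and does a run-length scan over the sorted list summing min(run_length, max(k,0)) per run.
import Mathlib
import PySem

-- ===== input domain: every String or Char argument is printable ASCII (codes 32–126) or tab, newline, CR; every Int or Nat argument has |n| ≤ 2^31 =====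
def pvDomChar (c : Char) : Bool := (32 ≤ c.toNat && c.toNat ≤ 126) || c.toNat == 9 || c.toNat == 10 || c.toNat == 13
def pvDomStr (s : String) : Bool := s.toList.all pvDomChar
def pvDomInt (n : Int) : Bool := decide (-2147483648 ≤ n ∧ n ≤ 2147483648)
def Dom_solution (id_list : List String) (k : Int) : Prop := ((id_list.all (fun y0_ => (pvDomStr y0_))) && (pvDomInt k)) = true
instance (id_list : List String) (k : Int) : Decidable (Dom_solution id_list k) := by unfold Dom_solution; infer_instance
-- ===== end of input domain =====

-- B replaces A's capped in-loop dict counting by gather-all-distinct-per-day tokens, sort, then scan runs summing min(run, cap) (objective: alternative).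


-- ===== PORT A =====
-- body of A's inner loop: the defaultdict access dict1[val] materializes 0, then the conditional increment
def solStepA (k : Int) (dict1 : PySem.Dict String Int) (val : String) : PySem.Dict String Int :=
  let dict1 := if dict1.contains val then dict1 else dict1.insert val 0
  if dict1.getD val 0 < k then dict1.insert val (dict1.getD val 0 + 1) else dict1

def solution (id_list : List String) (k : Int) : Int :=
  let dict1 :=
    id_list.foldl (fun dict1 day_id_list =>
      (PySem.Set.ofList ((PySem.Str.split? day_id_list " ").getD [])).foldl (solStepA k) dict1)
      PySem.Dict.empty
  (PySem.Dict.values dict1).sum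

-- ===== PORT B =====
-- body of B's scan loop; state = (total, run, prev)
def solStepB (cap : Int) (st : Int × Int × Option String) (t : String) : Int × Int × Option String :=
  match st with
  | (total, run, prev) =>
    if prev == some t then (total, run + 1, prev)
    else (total + min run cap, 1, some t)

def solution_alt (id_list : List String) (k : Int) : Int :=
  let tokens :=
    id_list.foldl (fun tokens day =>
      tokens ++ PySem.Set.ofList ((PySem.Str.split? day " ").getD [])) []
  let tokens := PySem.List.sorted tokens (fun x => x) false
  let cap := max k 0
  let st := tokens.foldl (solStepB cap) (0, 0, none)
  st.1 + min st.2.1 cap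

-- ===== PRECONDITION & SPEC =====
def Spec_solution (id_list : List String) (k : Int) (out : Int) : Prop := out = solution_alt id_list k
instance (id_list : List String) (k : Int) (out : Int) : Decidable (Spec_solution id_list k out) := by unfold Spec_solution; infer_instance

-- ===== CLAIM (what is proved, stated in full; the proofs are below) =====
def Claim_equal_solution : Prop := ∀ (id_list : List String) (k : Int), Dom_solution id_list k → Spec_solution id_list k (solution id_list k)

-- ===== LEMMAS AND PROOFS =====

-- the common specification: sum over distinct tokens of min(count, cap)
def capSum (cap : Int) : List String → Int
  | [] => 0
  | x :: l => min (1 + (l.count x : Int)) cap + capSum cap (l.filter (fun y => y ≠ x))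
termination_by l => l.length
decreasing_by simp; exact le_trans (List.length_filter_le _ _) (by simp)

-- both nested folds flatten to a single fold over the concatenated token stream
lemma foldl_flatMap {α β σ : Type} (g : σ → β → σ) (f : α → List β) :
    ∀ (L : List α) (init : σ),
      L.foldl (fun acc a => (f a).foldl g acc) init = (L.flatMap f).foldl g init := by
  intro L
  induction L with
  | nil => intro init; rfl
  | cons x xs ih => intro init; simp [List.flatMap_cons, List.foldl_append, ih]

lemma tokens_eq_flatMap {α β : Type} (f : α → List β) :
    ∀ (L : List α) (init : List β),
      L.foldl (fun acc a => acc ++ f a) init = init ++ L.flatMap f := by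
  intro L
  induction L with
  | nil => intro init; simp
  | cons x xs ih => intro init; simp [List.flatMap_cons, ih]

-- arithmetic of the capped counter: one more occurrence
lemma capSucc (k cur c : Int) (hc : 0 ≤ c) (hcur : cur = min c (max k 0)) (hlt : cur < k) :
    cur + 1 = min (c + 1) (max k 0) := by
  rcases le_total k 0 with hk0 | hk0
  · rw [max_eq_right hk0] at hcur ⊢; omega
  · rw [max_eq_left hk0] at hcur ⊢; omega

lemma capStay (k cur c : Int) (hc : 0 ≤ c) (hcur : cur = min c (max k 0)) (hlt : ¬ cur < k) :
    cur = min (c + 1) (max k 0) := by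
  rcases le_total k 0 with hk0 | hk0
  · rw [max_eq_right hk0] at hcur ⊢; omega
  · rw [max_eq_left hk0] at hcur ⊢; omega

-- A's dict after processing the token stream l: nodup keys = distinct tokens, values = capped counts
def invA (k : Int) (l : List String) (d : PySem.Dict String Int) : Prop :=
  d.keys.Nodup ∧ ∀ key, (key ∈ d.keys ↔ key ∈ l) ∧ d.getD key 0 = min (l.count key : Int) (max k 0)

lemma invA_fold (k : Int) (l : List String) :
    invA k l (l.foldl (solStepA k) PySem.Dict.empty) := by
  induction l using List.reverseRecOn with
  | nil =>
    refine ⟨by simp [PySem.Dict.keys_empty], fun key => ?_⟩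
    simp [PySem.Dict.keys_empty, PySem.Dict.getD_empty]
  | append_singleton l val ih =>
    obtain ⟨hnd, hv⟩ := ih
    rw [List.foldl_append]
    simp only [List.foldl_cons, List.foldl_nil]
    set d := l.foldl (solStepA k) PySem.Dict.empty with hd
    have hcnt : ∀ key, ((l ++ [val]).count key : Int)
        = (l.count key : Int) + (if key = val then 1 else 0) := by
      intro key
      by_cases h : key = val
      · subst h; simp [List.count_append]
      · have h0 : List.count key [val] = 0 := by
          rw [List.count_eq_zero]; simp [h]
        simp [List.count_append, h0, h]
    have hmemiff : ∀ key, key ∈ l ++ [val] ↔ key ∈ l ∨ key = val := by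
      intro key; simp [List.mem_append]
    unfold solStepA
    by_cases hc : d.contains val = true
    · have hvl : val ∈ l := by
        rw [PySem.Dict.contains_eq_decide_mem_keys] at hc
        exact (hv val).1.mp (by simpa using hc)
      have hgd : d.getD val 0 = min (l.count val : Int) (max k 0) := (hv val).2
      have hmem : ∀ key, key ∈ d.keys ↔ key ∈ l ++ [val] := by
        intro key
        rw [(hv key).1, hmemiff key]
        constructor
        · exact Or.inl
        · rintro (h | rfl)
          · exact h
          · exact hvl
      simp only [hc, if_true]
      split_ifs with hlt
      · refine ⟨?_, fun key => ?_⟩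
        · rw [PySem.Dict.keys_insert_of_contains d _ hc]; exact hnd
        · refine ⟨by rw [PySem.Dict.keys_insert_of_contains d _ hc]; exact hmem key, ?_⟩
          rw [PySem.Dict.getD_insert, hcnt key]
          by_cases hk : key = val
          · subst hk
            rw [if_pos rfl, if_pos rfl]
            exact capSucc k _ _ (Int.natCast_nonneg _) hgd hlt
          · rw [if_neg hk, if_neg hk, (hv key).2]; ring_nf
      · refine ⟨hnd, fun key => ?_⟩
        refine ⟨hmem key, ?_⟩
        rw [hcnt key]
        by_cases hk : key = val
        · subst hk
          rw [if_pos rfl]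
          exact capStay k _ _ (Int.natCast_nonneg _) hgd hlt
        · rw [if_neg hk, (hv key).2]; ring_nf
    · have hc' : d.contains val = false := by simpa using hc
      have hnotmem : val ∉ l := by
        have := (hv val).1
        rw [PySem.Dict.contains_eq_decide_mem_keys] at hc'
        simp at hc'
        exact fun h => hc' (this.mpr h)
      have hcount0 : l.count val = 0 := List.count_eq_zero.mpr hnotmem
      have hgd0 : (d.insert val 0).getD val 0 = 0 := by
        rw [PySem.Dict.getD_insert]; simp
      have hck : (d.insert val 0).contains val = true := PySem.Dict.contains_insert_self d val 0
      have hkeys0 : (d.insert val 0).keys = d.keys ++ [val] :=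
        PySem.Dict.keys_insert_of_not_contains d _ hc'
      have hndk : (d.insert val 0).keys.Nodup := PySem.Dict.nodup_keys_insert d val 0 hnd
      have hmem : ∀ key, key ∈ (d.insert val 0).keys ↔ key ∈ l ++ [val] := by
        intro key
        rw [hkeys0, hmemiff key, List.mem_append, (hv key).1]
        simp
      have hmin0 : (0:Int) = min ((0:Int)) (max k 0) :=
        (min_eq_left (le_max_right k 0)).symm
      simp only [hc', Bool.false_eq_true, if_false]
      split_ifs with hlt
      · refine ⟨?_, fun key => ?_⟩
        · rw [PySem.Dict.keys_insert_of_contains _ _ hck]; exact hndk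
        · refine ⟨by rw [PySem.Dict.keys_insert_of_contains _ _ hck]; exact hmem key, ?_⟩
          rw [PySem.Dict.getD_insert, hcnt key]
          by_cases hk : key = val
          · subst hk
            rw [if_pos rfl, if_pos rfl, hcount0, hgd0]
            rw [hgd0] at hlt
            simp only [Nat.cast_zero]
            exact capSucc k 0 0 le_rfl hmin0 hlt
          · rw [if_neg hk, PySem.Dict.getD_insert, if_neg hk, if_neg hk, (hv key).2]
            ring_nf
      · refine ⟨hndk, fun key => ?_⟩
        refine ⟨hmem key, ?_⟩
        rw [PySem.Dict.getD_insert, hcnt key]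
        by_cases hk : key = val
        · subst hk
          rw [if_pos rfl, if_pos rfl, hcount0]
          rw [hgd0] at hlt
          simp only [Nat.cast_zero]
          exact capStay k 0 0 le_rfl hmin0 hlt
        · rw [if_neg hk, if_neg hk, (hv key).2]; ring_nf

-- sum over any nodup enumeration of l's distinct elements of min(count, cap) is capSum
lemma keys_sum_eq_capSum_aux (cap : Int) :
    ∀ (n : Nat) (l keys : List String), l.length ≤ n → keys.Nodup →
      (∀ x, x ∈ keys ↔ x ∈ l) →
      (keys.map (fun t => min ((l.count t : Int)) cap)).sum = capSum cap l := by
  intro n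
  induction n with
  | zero =>
    intro l keys hlen hnd hmem
    have hl : l = [] := List.eq_nil_of_length_eq_zero (Nat.le_zero.mp hlen)
    subst hl
    have hk : keys = [] := List.eq_nil_iff_forall_not_mem.mpr
      (fun a ha => by simpa using (hmem a).mp ha)
    simp [hk, capSum]
  | succ n ih =>
    intro l keys hlen hnd hmem
    cases l with
    | nil =>
      have hk : keys = [] := List.eq_nil_iff_forall_not_mem.mpr
        (fun a ha => by simpa using (hmem a).mp ha)
      simp [hk, capSum]
    | cons x l =>
      have hx : x ∈ keys := (hmem x).mpr (List.mem_cons_self ..)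
      have hperm : keys.Perm (x :: keys.erase x) := List.perm_cons_erase hx
      have hsum := (hperm.map (fun t => min ((x :: l).count t : Int) cap)).sum_eq
      rw [hsum]
      simp only [List.map_cons, List.sum_cons]
      have hcx : ((x :: l).count x : Int) = 1 + (l.count x : Int) := by
        rw [List.count_cons_self]; push_cast; ring
      have htail : ((keys.erase x).map (fun t => min ((x :: l).count t : Int) cap)).sum
          = ((keys.erase x).map
              (fun t => min (((l.filter (fun y => y ≠ x)).count t : Int)) cap)).sum := by
        apply congrArg
        apply List.map_congr_left
        intro t ht
        have htx : t ≠ x := ((List.Nodup.mem_erase_iff hnd).mp ht).1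
        have h1 : (l.filter (fun y => y ≠ x)).count t = l.count t := by
          rw [List.count_filter]; simp [htx]
        have h2 : (x :: l).count t = l.count t := by
          rw [List.count_cons]; simp [Ne.symm htx]
        rw [h1, h2]
      rw [htail, hcx]
      simp only [capSum]
      congr 1
      apply ih
      · calc (l.filter (fun y => y ≠ x)).length ≤ l.length := List.length_filter_le _ _
          _ ≤ n := Nat.le_of_succ_le_succ hlen
      · exact hnd.erase x
      · intro t
        rw [List.Nodup.mem_erase_iff hnd, hmem t]
        simp only [List.mem_filter, List.mem_cons]
        constructor
        · rintro ⟨htx, h | h⟩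
          · exact absurd h htx
          · exact ⟨h, by simpa using htx⟩
        · rintro ⟨h, htx⟩
          exact ⟨by simpa using htx, Or.inr h⟩

lemma keys_sum_eq_capSum (cap : Int) (l keys : List String) (hnd : keys.Nodup)
    (hmem : ∀ x, x ∈ keys ↔ x ∈ l) :
    (keys.map (fun t => min ((l.count t : Int)) cap)).sum = capSum cap l :=
  keys_sum_eq_capSum_aux cap l.length l keys le_rfl hnd hmem

-- B's run-length scan over a sorted list computes capSum: mid-run version
lemma scan_run (cap : Int) (hcap : 0 ≤ cap) :
    ∀ (l : List String), l.Pairwise (· ≤ ·) →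
      ∀ (total run : Int) (p : String), (∀ x ∈ l, p ≤ x) →
        (l.foldl (solStepB cap) (total, run, some p)).1
          + min (l.foldl (solStepB cap) (total, run, some p)).2.1 cap
          = total + min (run + (l.count p : Int)) cap
            + capSum cap (l.filter (fun y => y ≠ p)) := by
  intro l
  induction l with
  | nil =>
    intro _ total run p _
    simp [capSum]
  | cons x l ih =>
    intro hpw total run p hge
    have hxle : ∀ y ∈ l, x ≤ y := (List.pairwise_cons.mp hpw).1
    have hpwl : l.Pairwise (· ≤ ·) := hpw.of_cons
    simp only [List.foldl_cons, solStepB]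
    by_cases hxp : x = p
    · subst hxp
      rw [if_pos (show ((some x : Option String) == some x) = true by simp)]
      rw [ih hpwl total (run + 1) x hxle]
      have h1 : (((x :: l).count x : Nat) : Int) = (l.count x : Int) + 1 := by
        rw [List.count_cons_self]; push_cast; ring
      have h2 : (x :: l).filter (fun y => y ≠ x) = l.filter (fun y => y ≠ x) := by
        simp
      rw [h1, h2]
      have h3 : run + 1 + (l.count x : Int) = run + ((l.count x : Int) + 1) := by ring
      rw [h3]
    · have hplt : p < x := lt_of_le_of_ne (hge x (List.mem_cons_self ..)) (Ne.symm hxp)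
      have hpnot : ∀ y ∈ (x :: l), y ≠ p := by
        intro y hy
        rcases List.mem_cons.mp hy with h | h
        · subst h; exact Ne.symm (ne_of_lt hplt)
        · exact fun he => absurd (he ▸ hxle y h) (not_le.mpr hplt)
      have hne : ¬ (((some p : Option String) == some x) = true) := by
        simp only [beq_iff_eq, Option.some.injEq]
        exact fun h => hxp h.symm
      rw [if_neg hne]
      rw [ih hpwl (total + min run cap) 1 x hxle]
      have hcount0 : (x :: l).count p = 0 :=
        List.count_eq_zero.mpr (fun h => hpnot p h rfl)
      have hfilter : (x :: l).filter (fun y => y ≠ p) = x :: l := by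
        apply List.filter_eq_self.mpr
        intro y hy; simpa using hpnot y hy
      rw [hcount0, hfilter]
      simp only [capSum]
      push_cast
      ring_nf

-- B's scan from the initial state
lemma scan_eq_capSum (cap : Int) (hcap : 0 ≤ cap) (l : List String)
    (hpw : l.Pairwise (· ≤ ·)) :
    (l.foldl (solStepB cap) (0, 0, none)).1
      + min (l.foldl (solStepB cap) (0, 0, none)).2.1 cap = capSum cap l := by
  cases l with
  | nil => simp [capSum, min_eq_left hcap]
  | cons x l =>
    have hxle : ∀ y ∈ l, x ≤ y := (List.pairwise_cons.mp hpw).1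
    simp only [List.foldl_cons, solStepB]
    rw [if_neg (show ¬ (((none : Option String) == some x) = true) by simp)]
    rw [min_eq_left hcap]
    rw [scan_run cap hcap l hpw.of_cons (0 + 0) 1 x hxle]
    simp only [capSum]
    push_cast
    ring_nf

-- ===== VERDICT (by name: the statement is the Claim_ definition above) =====
theorem solution_spec : Claim_equal_solution := by
  intro id_list k _
  unfold Spec_solution solution solution_alt
  set f : String → List String := fun day => PySem.Set.ofList ((PySem.Str.split? day " ").getD []) with hf
  set cap := max k 0 with hcap
  have hcap0 : 0 ≤ cap := le_max_right k 0
  set stream := id_list.flatMap f with hstream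
  -- A's nested fold is a fold over the stream
  rw [foldl_flatMap (solStepA k) f id_list PySem.Dict.empty]
  -- B's token list is the stream
  rw [tokens_eq_flatMap f id_list []]
  simp only [List.nil_append]
  set sorted := PySem.List.sorted (id_list.flatMap f) (fun x => x) false with hsorted
  have hperm : sorted.Perm (id_list.flatMap f) := PySem.List.sorted_perm _ _ _
  have hpw : sorted.Pairwise (· ≤ ·) := PySem.List.sorted_pairwise _ _
  obtain ⟨hnd, hv⟩ := invA_fold k (id_list.flatMap f)
  set d := (id_list.flatMap f).foldl (solStepA k) PySem.Dict.empty with hd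
  -- A's sum of values = keys-indexed capped counts over the sorted stream = capSum = B's scan
  have hvals : (PySem.Dict.values d).sum
      = (d.keys.map (fun t => min ((sorted.count t : Int)) cap)).sum := by
    rw [PySem.Dict.values_eq_map_keys d hnd 0]
    apply congrArg
    apply List.map_congr_left
    intro t _
    rw [(hv t).2, ← hperm.count_eq]
  rw [hvals, keys_sum_eq_capSum cap sorted d.keys hnd
    (fun x => by rw [(hv x).1, hperm.mem_iff]),
    ← scan_eq_capSum cap hcap0 sorted hpw]
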